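-- pv_equiv track=rewrite | github.com/AlgoLab/malva_experiments | analysis/plots/plot_heatmap.py | build_cumulate_table
-- ===== SOURCE A (Python) =====
-- category_labels = ['HomoRef', 'HetRef', 'HomoAlt', 'HetAlt']
--
-- def get_gt_category(gt):
--     # category_labels = ['HomoRef', 'HetRef', 'HomoAlt', 'HetAlt']
--     (x,y) = (int(x) for x in gt.split('/'))
--     if x == y and x == 0:
--         return 0 # HomoRef
--     elif x == y:
--         return 2 # HomoAlt
--     elif x != y and (x == 0 or y == 0):
--         return 1 # HetRef
--     else:
--         return 3 # HetAlt
--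
-- def build_cumulate_table(table, labels):
--     cumulate_table = [[0]*5 for _ in range(4)]
--     for i in range(0,len(labels)):
--         truth_gt = labels[i]
--         truth_cat = get_gt_category(truth_gt)
--         for j in range(0,len(labels)):
--             given_gt = labels[j]
--             given_cat = get_gt_category(given_gt)
--             value = int(table[i][j])
--             cumulate_table[truth_cat][given_cat] += value
--         j = len(labels)
--         value = int(table[i][j])
--         cumulate_table[truth_cat][4] += value
--     return cumulate_table, category_labels
-- ===== SOURCE B (Python) =====
-- category_labels = ['HomoRef', 'HetRef', 'HomoAlt', 'HetAlt']
--
-- def _category(gt):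
--     x, y = (int(p) for p in gt.split('/'))
--     if x == y:
--         return 0 if x == 0 else 2
--     return 1 if x == 0 or y == 0 else 3
--
-- def build_cumulate_table(table, labels):
--     # Group the sample indices by genotype category, then compute every output
--     # cell directly as the sum of the table block (row group) x (column group);
--     # the extra 5th column sums column n of each row group.
--     n = len(labels)
--     groups = [[], [], [], []]
--     for idx in range(n):
--         groups[_category(labels[idx])].append(idx)
--     col_sets = groups + [[n]]
--     ct = [[sum(int(table[i][j]) for i in rows for j in cols) for cols in col_sets]
--           for rows in groups]
--     return ct, category_labels
-- ===== Notes on version B (the rewrite author's own statement) =====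
-- stated objective: alternative
-- what changed: B replaces A's cell-by-cell accumulation into a mutable 4x5 table (re-parsing labels inside the inner loop) by a group-then-sum algorithm: it partitions the indices into the 4 category groups once, then computes each output cell directly as the sum over the corresponding (row group) x (column group) block of the table; correct because addition is commutative, so summing the block per output cell equals accumulating cells in scan order.
import Mathlib
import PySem

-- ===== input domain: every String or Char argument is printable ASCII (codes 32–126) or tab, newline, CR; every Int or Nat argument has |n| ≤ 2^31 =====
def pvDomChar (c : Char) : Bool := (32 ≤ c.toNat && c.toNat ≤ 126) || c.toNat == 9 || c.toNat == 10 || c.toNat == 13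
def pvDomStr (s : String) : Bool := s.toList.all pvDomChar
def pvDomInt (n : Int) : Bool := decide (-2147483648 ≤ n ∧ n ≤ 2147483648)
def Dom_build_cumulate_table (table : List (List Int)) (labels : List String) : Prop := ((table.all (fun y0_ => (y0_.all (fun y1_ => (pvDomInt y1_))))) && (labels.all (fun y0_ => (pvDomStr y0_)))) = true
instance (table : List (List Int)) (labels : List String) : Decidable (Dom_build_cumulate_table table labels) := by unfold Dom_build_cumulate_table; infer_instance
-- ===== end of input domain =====

-- B replaces A's cell-by-cell accumulation into a mutable 4x5 table by a group-then-sum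
-- algorithm: it partitions the indices into the 4 category groups once and computes each
-- output cell directly as the sum over its (row group) x (column group) block (objective: alternative).

-- ===== PORT A =====

-- module constant category_labels
def category_labels : List String := ["HomoRef", "HetRef", "HomoAlt", "HetAlt"]

-- 'cumulate_table[r][c] += v' — the literal nested read-modify-write A's body contains
def pvAdd2 (m : List (List Int)) (r c : Nat) (v : Int) : List (List Int) :=
  PySem.List.pySetD m r
    (PySem.List.pySetD (PySem.List.pyGetD m r []) c
      (PySem.List.pyGetD (PySem.List.pyGetD m r []) c 0 + v))

-- A's get_gt_category; none = the ValueError of int()/the 2-tuple unpacking (excluded by Pre_)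
def pvCatA (gt : String) : Option Nat :=
  match PySem.Str.split? gt "/" with
  | some [a, b] =>
    match PySem.Int.ofStr? a, PySem.Int.ofStr? b with
    | some x, some y =>
        some (if x = y ∧ x = 0 then 0
              else if x = y then 2
              else if x ≠ y ∧ (x = 0 ∨ y = 0) then 1
              else 3)
    | _, _ => none
  | _ => none

def build_cumulate_table (table : List (List Int)) (labels : List String) : List (List Int) × List String :=
  let init : List (List Int) := [[0,0,0,0,0],[0,0,0,0,0],[0,0,0,0,0],[0,0,0,0,0]]
  let n : Int := PySem.List.len labels
  let ct := (PySem.List.pyRange 0 n 1).foldl (fun ct i =>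
    let truth_gt := PySem.List.pyGetD labels i ""
    let truth_cat := (pvCatA truth_gt).getD 0
    let ct := (PySem.List.pyRange 0 n 1).foldl (fun ct j =>
      let given_gt := PySem.List.pyGetD labels j ""
      let given_cat := (pvCatA given_gt).getD 0
      let value := PySem.List.pyGetD (PySem.List.pyGetD table i []) j 0
      pvAdd2 ct truth_cat given_cat value) ct
    let value := PySem.List.pyGetD (PySem.List.pyGetD table i []) n 0
    pvAdd2 ct truth_cat 4 value) init
  (ct, category_labels)

-- ===== PORT B =====

-- B's _category; none = the ValueError of int()/the 2-tuple unpacking (excluded by Pre_)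
def pvCatB (gt : String) : Option Nat :=
  match PySem.Str.split? gt "/" with
  | some [a, b] =>
    match PySem.Int.ofStr? a, PySem.Int.ofStr? b with
    | some x, some y =>
        some (if x = y then (if x = 0 then 0 else 2)
              else if x = 0 ∨ y = 0 then 1 else 3)
    | _, _ => none
  | _ => none

def build_cumulate_table_alt (table : List (List Int)) (labels : List String) : List (List Int) × List String :=
  let n : Int := PySem.List.len labels
  let groups : List (List Int) := (PySem.List.pyRange 0 n 1).foldl (fun gs idx =>
      let c := (pvCatB (PySem.List.pyGetD labels idx "")).getD 0
      PySem.List.pySetD gs c (PySem.List.pyGetD gs c [] ++ [idx])) [[],[],[],[]]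
  let col_sets := groups ++ [[n]]
  let ct := groups.map (fun rows => col_sets.map (fun cols =>
      rows.foldl (fun s i => cols.foldl (fun s j =>
        s + PySem.List.pyGetD (PySem.List.pyGetD table i []) j 0) s) 0))
  (ct, category_labels)

-- ===== PRECONDITION & SPEC =====

-- label parses as 'x/y' with two Python ints
def pvLabelOk (l : String) : Bool :=
  match PySem.Str.split? l "/" with
  | some [a, b] => (PySem.Int.ofStr? a).isSome && (PySem.Int.ofStr? b).isSome
  | _ => false

-- Pre_ excludes exactly the inputs on which A raises: a label that is not 'int/int'
-- (ValueError from int()/unpacking), or table shorter than labels / an accessed row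
-- shorter than len(labels)+1 (IndexError). A returns on every input admitted here.
def Pre_build_cumulate_table (table : List (List Int)) (labels : List String) : Prop :=
  (labels.all pvLabelOk
    && decide (labels.length ≤ table.length)
    && (table.take labels.length).all (fun row => decide (labels.length + 1 ≤ row.length))) = true
instance (table : List (List Int)) (labels : List String) : Decidable (Pre_build_cumulate_table table labels) := by unfold Pre_build_cumulate_table; infer_instance

def pvWitness_build_cumulate_table : List (List Int) × List String :=
  ([[1, 2, 0], [0, 3, 4]], ["0/0", "0/1"])

def Spec_build_cumulate_table (table : List (List Int)) (labels : List String) (out : List (List Int) × List String) : Prop := out = build_cumulate_table_alt table labels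
instance (table : List (List Int)) (labels : List String) (out : List (List Int) × List String) : Decidable (Spec_build_cumulate_table table labels out) := by unfold Spec_build_cumulate_table; infer_instance

-- ===== CLAIM (what is proved, stated in full; the proofs are below) =====
def Claim_equal_build_cumulate_table : Prop := ∀ (table : List (List Int)) (labels : List String), Dom_build_cumulate_table table labels → Pre_build_cumulate_table table labels → Spec_build_cumulate_table table labels (build_cumulate_table table labels)



-- ===== LEMMAS AND PROOFS =====

-- the category of index i (through A's parser) and the table entry read at (i, j)
def pvTc (labels : List String) (i : Int) : Nat :=
  (pvCatA (PySem.List.pyGetD labels i "")).getD 0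

def pvTv (table : List (List Int)) (i j : Int) : Int :=
  PySem.List.pyGetD (PySem.List.pyGetD table i []) j 0

-- the group of indices 0..m-1 whose label has category r
def pvGrp (labels : List String) (m : Nat) (r : Nat) : List Int :=
  (PySem.List.pyRange 0 (m : Int) 1).filter (fun i => pvTc labels i == r)

-- a 4x5 table as a function of (row, column)
def mk4x5 (f : Nat → Nat → Int) : List (List Int) :=
  [[f 0 0, f 0 1, f 0 2, f 0 3, f 0 4],
   [f 1 0, f 1 1, f 1 2, f 1 3, f 1 4],
   [f 2 0, f 2 1, f 2 2, f 2 3, f 2 4],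
   [f 3 0, f 3 1, f 3 2, f 3 3, f 3 4]]

-- A's per-row-i contribution to output cell (a, b)
def pvRowF (table : List (List Int)) (labels : List String) (n : Int) (i : Int) (a b : Nat) : Int :=
  ((PySem.List.pyRange 0 n 1).map (fun j =>
      if a = pvTc labels i ∧ b = pvTc labels j then pvTv table i j else 0)).sum
  + (if a = pvTc labels i ∧ b = 4 then pvTv table i n else 0)

-- the two category helpers agree on every label
theorem pvCat_eq (gt : String) : pvCatB gt = pvCatA gt := by
  unfold pvCatA pvCatB
  rcases PySem.Str.split? gt "/" with _ | ⟨_ | ⟨a, _ | ⟨b, _ | _⟩⟩⟩ <;> try rfl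
  cases h1 : PySem.Int.ofStr? a <;> cases h2 : PySem.Int.ofStr? b <;>
    (simp only [h1, h2]; try rfl)
  rename_i x y
  congr 1
  split_ifs <;> omega

theorem pvCatA_some_lt (gt : String) (k : Nat) (h : pvCatA gt = some k) : k < 4 := by
  unfold pvCatA at h
  split at h
  · split at h
    · rw [Option.some_inj] at h
      split_ifs at h <;> omega
    · exact absurd h (by simp)
  · exact absurd h (by simp)

theorem pvTc_lt (labels : List String) (i : Int) : pvTc labels i < 4 := by
  unfold pvTc
  cases h : pvCatA (PySem.List.pyGetD labels i "") with
  | none => simp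
  | some k => simpa using pvCatA_some_lt _ k h

-- pvAdd2 on a function-table: a pointwise addition
theorem pvAdd2_mk (f : Nat → Nat → Int) (r c : Nat) (v : Int) (hr : r < 4) (hc : c < 5) :
    pvAdd2 (mk4x5 f) r c v
      = mk4x5 (fun a b => f a b + if a = r ∧ b = c then v else 0) := by
  interval_cases r <;> interval_cases c <;>
    simp [pvAdd2, mk4x5, PySem.List.pyGetD_ofNat', PySem.List.pySetD_of_nonneg,
      List.set, List.getD]

-- a fold whose every step is a pointwise addition on a function-table
theorem foldl_mk_add {alpha : Type} (body : List (List Int) → alpha → List (List Int))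
    (g : alpha → Nat → Nat → Int) (L : List alpha)
    (step : ∀ (f : Nat → Nat → Int), ∀ x ∈ L,
      body (mk4x5 f) x = mk4x5 (fun a b => f a b + g x a b)) :
    ∀ f : Nat → Nat → Int,
      L.foldl body (mk4x5 f) = mk4x5 (fun a b => f a b + (L.map (fun x => g x a b)).sum) := by
  induction L with
  | nil => intro f; simp
  | cons x L ih =>
    intro f
    rw [List.foldl_cons, step f x (by simp)]
    rw [ih (fun f x hx => step f x (by simp [hx])) _]
    congr 1; funext a b; simp [add_assoc]

-- A computes the function-table of all per-row contributions
theorem pvA_char (table : List (List Int)) (labels : List String) :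
    build_cumulate_table table labels
      = (mk4x5 (fun a b =>
          ((PySem.List.pyRange 0 (labels.length : Int) 1).map
            (fun i => pvRowF table labels (labels.length : Int) i a b)).sum),
         category_labels) := by
  unfold build_cumulate_table
  simp only [PySem.List.len_eq]
  refine congrArg₂ Prod.mk ?_ rfl
  refine ((foldl_mk_add _ (fun i a b => pvRowF table labels (labels.length : Int) i a b) _
      ?_ (fun _ _ => 0)).trans ?_)
  · intro f i _
    dsimp only
    rw [foldl_mk_add _
        (fun j a b => if a = pvTc labels i ∧ b = pvTc labels j then pvTv table i j else 0) _
        (fun f' j _ => pvAdd2_mk f' (pvTc labels i) (pvTc labels j) (pvTv table i j)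
          (pvTc_lt labels i) (Nat.lt_succ_of_lt (pvTc_lt labels j))) f]
    refine (pvAdd2_mk _ (pvTc labels i) 4 (pvTv table i (labels.length : Int))
        (pvTc_lt labels i) (by omega)).trans ?_
    refine congrArg mk4x5 (funext fun a => funext fun b => ?_)
    simp [pvRowF, add_assoc]
  · refine congrArg mk4x5 (funext fun a => funext fun b => ?_)
    simp

-- one step of B's grouping loop
theorem pvGrp_succ (labels : List String) (m r : Nat) :
    pvGrp labels (m + 1) r
      = pvGrp labels m r ++ (if pvTc labels (m : Int) = r then [(m : Int)] else []) := by
  unfold pvGrp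
  rw [show ((m + 1 : Nat) : Int) = (m : Int) + 1 by push_cast; ring,
      PySem.List.pyRange_one_succ_right (by positivity), List.filter_append]
  by_cases h : pvTc labels (m : Int) = r
  · simp [List.filter, h]
  · have hb : (pvTc labels (m : Int) == r) = false := by simpa using h
    simp [List.filter, h, hb]

-- B's grouping loop computes the four category groups
theorem pvGroups_char (labels : List String) (m : Nat) :
    (PySem.List.pyRange 0 (m : Int) 1).foldl (fun gs idx =>
        PySem.List.pySetD gs ((pvCatB (PySem.List.pyGetD labels idx "")).getD 0)
          (PySem.List.pyGetD gs ((pvCatB (PySem.List.pyGetD labels idx "")).getD 0) []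
            ++ [idx])) [[],[],[],[]]
      = [pvGrp labels m 0, pvGrp labels m 1, pvGrp labels m 2, pvGrp labels m 3] := by
  induction m with
  | zero => rfl
  | succ m ih =>
    rw [show ((m + 1 : Nat) : Int) = (m : Int) + 1 by push_cast; ring,
        PySem.List.pyRange_one_succ_right (by positivity), List.foldl_append, ih]
    simp only [List.foldl_cons, List.foldl_nil]
    have hc : (pvCatB (PySem.List.pyGetD labels (m : Int) "")).getD 0
        = pvTc labels (m : Int) := by rw [pvCat_eq]; rfl
    rw [hc]
    have hlt := pvTc_lt labels (m : Int)
    simp only [pvGrp_succ labels m]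
    interval_cases h : pvTc labels (m : Int) <;>
      simp [PySem.List.pyGetD_ofNat', PySem.List.pySetD_of_nonneg, List.set, List.getD]

-- B's nested sum-fold is the sum of sums
theorem pvCell_char (table : List (List Int)) (rows cols : List Int) :
    rows.foldl (fun s i => cols.foldl (fun s j =>
        s + PySem.List.pyGetD (PySem.List.pyGetD table i []) j 0) s) 0
      = (rows.map (fun i => (cols.map (fun j => pvTv table i j)).sum)).sum := by
  rw [PySem.List.foldl_congr_mem rows
        (fun s i => cols.foldl (fun s j =>
          s + PySem.List.pyGetD (PySem.List.pyGetD table i []) j 0) s)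
        (fun s i => s + (cols.map (fun j => pvTv table i j)).sum) 0
        (fun s i _ => PySem.List.foldl_add cols (fun j => pvTv table i j) s)]
  rw [PySem.List.foldl_add]
  simp

-- summing over a filtered list is summing a guarded term over the whole list
theorem pvFilter_sum (l : List Int) (p : Int → Bool) (h : Int → Int) :
    ((l.filter p).map h).sum = (l.map (fun x => if p x then h x else 0)).sum := by
  induction l with
  | nil => rfl
  | cons x l ih => by_cases hx : p x <;> simp [hx, ih]

-- a block sum over (group r) x (group c) equals A's guarded double sum, for c < 4
theorem pvColEntry (table : List (List Int)) (labels : List String) (n : Nat) (r c : Nat)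
    (hc : c < 4) :
    ((pvGrp labels n r).map (fun i =>
        ((pvGrp labels n c).map (fun j => pvTv table i j)).sum)).sum
      = ((PySem.List.pyRange 0 (n : Int) 1).map
          (fun i => pvRowF table labels (n : Int) i r c)).sum := by
  have hR : ∀ i ∈ PySem.List.pyRange 0 (n : Int) 1,
      pvRowF table labels (n : Int) i r c
        = if pvTc labels i = r then
            ((PySem.List.pyRange 0 (n : Int) 1).map
              (fun j => if pvTc labels j = c then pvTv table i j else 0)).sum
          else 0 := by
    intro i _
    unfold pvRowF
    rw [if_neg (by omega : ¬(r = pvTc labels i ∧ c = 4)), add_zero]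
    by_cases h : r = pvTc labels i
    · rw [if_pos h.symm]
      refine congrArg List.sum (List.map_congr_left fun j _ => ?_)
      by_cases h2 : c = pvTc labels j
      · rw [if_pos ⟨h, h2⟩, if_pos h2.symm]
      · rw [if_neg (fun hh => h2 hh.2), if_neg (fun hh => h2 hh.symm)]
    · rw [if_neg (fun hh => h hh.symm)]
      rw [List.map_congr_left (fun j _ => if_neg (fun hh => h hh.1))]
      simp
  rw [List.map_congr_left hR]
  unfold pvGrp
  rw [pvFilter_sum]
  refine congrArg List.sum (List.map_congr_left fun i _ => ?_)
  rw [pvFilter_sum]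
  simp only [beq_iff_eq]

-- a block sum over (group r) x the final column equals A's guarded sum at b = 4
theorem pvLastEntry (table : List (List Int)) (labels : List String) (n : Nat) (r : Nat) :
    ((pvGrp labels n r).map (fun i =>
        (([((n : Nat) : Int)]).map (fun j => pvTv table i j)).sum)).sum
      = ((PySem.List.pyRange 0 (n : Int) 1).map
          (fun i => pvRowF table labels (n : Int) i r 4)).sum := by
  have hR : ∀ i ∈ PySem.List.pyRange 0 (n : Int) 1,
      pvRowF table labels (n : Int) i r 4
        = if pvTc labels i = r then pvTv table i (n : Int) else 0 := by
    intro i _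
    unfold pvRowF
    rw [List.map_congr_left (fun j _ => if_neg
      (fun hh => absurd hh.2 (by have := pvTc_lt labels j; omega)))]
    by_cases h : r = pvTc labels i
    · rw [if_pos ⟨h, rfl⟩, if_pos h.symm]
      simp
    · rw [if_neg (fun hh => h hh.1), if_neg (fun hh => h hh.symm)]
      simp
  rw [List.map_congr_left hR]
  unfold pvGrp
  rw [pvFilter_sum]
  refine congrArg List.sum (List.map_congr_left fun i _ => ?_)
  by_cases h : pvTc labels i = r <;> simp [h]

-- the ports agree (on all inputs: the totalised ports coincide even off Pre_)
theorem pv_build_eq (table : List (List Int)) (labels : List String) :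
    build_cumulate_table table labels = build_cumulate_table_alt table labels := by
  rw [pvA_char]
  unfold build_cumulate_table_alt
  simp only [PySem.List.len_eq]
  rw [pvGroups_char labels labels.length]
  simp only [List.cons_append, List.nil_append, List.map_cons, List.map_nil]
  simp only [pvCell_char]
  refine congrArg₂ Prod.mk ?_ rfl
  simp only [mk4x5]
  rw [pvColEntry table labels labels.length 0 0 (by omega),
      pvColEntry table labels labels.length 0 1 (by omega),
      pvColEntry table labels labels.length 0 2 (by omega),
      pvColEntry table labels labels.length 0 3 (by omega),
      pvColEntry table labels labels.length 1 0 (by omega),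
      pvColEntry table labels labels.length 1 1 (by omega),
      pvColEntry table labels labels.length 1 2 (by omega),
      pvColEntry table labels labels.length 1 3 (by omega),
      pvColEntry table labels labels.length 2 0 (by omega),
      pvColEntry table labels labels.length 2 1 (by omega),
      pvColEntry table labels labels.length 2 2 (by omega),
      pvColEntry table labels labels.length 2 3 (by omega),
      pvColEntry table labels labels.length 3 0 (by omega),
      pvColEntry table labels labels.length 3 1 (by omega),
      pvColEntry table labels labels.length 3 2 (by omega),
      pvColEntry table labels labels.length 3 3 (by omega),
      pvLastEntry table labels labels.length 0,
      pvLastEntry table labels labels.length 1,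
      pvLastEntry table labels labels.length 2,
      pvLastEntry table labels labels.length 3]

-- ===== VERDICT (by name: the statement is the Claim_ definition above) =====
theorem build_cumulate_table_spec : Claim_equal_build_cumulate_table := by
  intro table labels _ _
  unfold Spec_build_cumulate_table
  exact pv_build_eq table labels
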